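-- pv_equiv track=rewrite | github.com/tonyliangli/TWT | utils/data_utils.py | get_idx_from_offset
-- ===== SOURCE A (Python) =====
-- def get_idx_from_offset(token_offsets, start_offset, end_offset):
--     start_idx, end_idx = -1, -1
--     if token_offsets:
--         for idx, token_offset in enumerate(token_offsets):
--             if start_offset >= token_offset[0] and start_offset <= token_offset[1]:
--                 start_idx = idx
--             if end_offset >= token_offset[0] and end_offset <= token_offset[1]:
--                 end_idx = idx + 1
--                 break
--     return start_idx, end_idx
-- ===== SOURCE B (Python) =====
-- def get_idx_from_offset(token_offsets, start_offset, end_offset):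
--     n = len(token_offsets)
--     # Pass 1: first token whose interval contains end_offset.
--     end_idx = -1
--     stop = n - 1
--     for i, (a, b) in enumerate(token_offsets):
--         if a <= end_offset <= b:
--             end_idx = i + 1
--             stop = i
--             break
--     # Pass 2: last token at index <= stop whose interval contains start_offset,
--     # found as the first hit scanning backwards.
--     start_idx = -1
--     for i in range(stop, -1, -1):
--         a, b = token_offsets[i]
--         if a <= start_offset <= b:
--             start_idx = i
--             break
--     return start_idx, end_idx
-- ===== Notes on version B (the rewrite author's own statement) =====
-- stated objective: alternative
-- what changed: A's single coupled loop (overwrite start match, break on end match) is split into two independent passes: a forward pass finding the first end-containing token, then a backward pass over the prefix up to that token taking the first start hit (= A's last-match-wins).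
import Mathlib
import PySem

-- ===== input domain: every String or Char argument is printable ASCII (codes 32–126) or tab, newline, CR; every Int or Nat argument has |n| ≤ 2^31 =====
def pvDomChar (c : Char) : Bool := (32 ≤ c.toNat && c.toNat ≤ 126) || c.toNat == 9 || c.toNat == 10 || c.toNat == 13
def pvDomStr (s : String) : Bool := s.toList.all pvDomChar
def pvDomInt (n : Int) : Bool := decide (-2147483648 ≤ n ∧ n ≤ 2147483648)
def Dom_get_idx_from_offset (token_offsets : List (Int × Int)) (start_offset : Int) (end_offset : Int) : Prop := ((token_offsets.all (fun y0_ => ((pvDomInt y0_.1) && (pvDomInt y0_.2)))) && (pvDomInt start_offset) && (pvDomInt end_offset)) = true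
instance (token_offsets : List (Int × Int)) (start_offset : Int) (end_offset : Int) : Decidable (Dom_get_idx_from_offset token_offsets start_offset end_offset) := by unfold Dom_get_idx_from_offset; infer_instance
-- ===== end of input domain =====

-- B replaces A's single coupled loop by two independent passes (forward first-end-match,
-- then backward first-start-match over the prefix); objective: alternative decomposition,
-- same cost, return values proved equal on all inputs.

-- ===== PORT A =====
-- A's loop: enumerate with index `idx`, overwrite `start_idx` on a start match,
-- break (return) on the first end match.
def pvGoA (start_offset end_offset : Int) : List (Int × Int) → Nat → Int → Int × Int
  | [], _, start_idx => (start_idx, -1)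
  | (a, b) :: rest, idx, start_idx =>
    let start_idx' := if start_offset ≥ a ∧ start_offset ≤ b then (idx : Int) else start_idx
    if end_offset ≥ a ∧ end_offset ≤ b then (start_idx', (idx : Int) + 1)
    else pvGoA start_offset end_offset rest (idx + 1) start_idx'

def get_idx_from_offset (token_offsets : List (Int × Int)) (start_offset : Int) (end_offset : Int) : Int × Int :=
  if token_offsets = [] then (-1, -1)
  else pvGoA start_offset end_offset token_offsets 0 (-1)

-- ===== PORT B =====
-- B pass 1: first index whose interval contains end_offset.
def pvFindEnd (end_offset : Int) : List (Int × Int) → Nat → Option Nat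
  | [], _ => none
  | (a, b) :: rest, i =>
    if a ≤ end_offset ∧ end_offset ≤ b then some i else pvFindEnd end_offset rest (i + 1)

-- B pass 2: scan backwards (the list argument is the reversed prefix, `i` counts down).
def pvFindStartRev (start_offset : Int) : List (Int × Int) → Nat → Int
  | [], _ => -1
  | (a, b) :: rest, i =>
    if a ≤ start_offset ∧ start_offset ≤ b then (i : Int)
    else pvFindStartRev start_offset rest (i - 1)

def get_idx_from_offset_alt (token_offsets : List (Int × Int)) (start_offset : Int) (end_offset : Int) : Int × Int :=
  match pvFindEnd end_offset token_offsets 0 with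
  | some i => (pvFindStartRev start_offset ((token_offsets.take (i + 1)).reverse) i, (i : Int) + 1)
  | none => (pvFindStartRev start_offset token_offsets.reverse (token_offsets.length - 1), -1)

-- ===== PRECONDITION & SPEC =====
def Spec_get_idx_from_offset (token_offsets : List (Int × Int)) (start_offset : Int) (end_offset : Int) (out : Int × Int) : Prop := out = get_idx_from_offset_alt token_offsets start_offset end_offset
instance (token_offsets : List (Int × Int)) (start_offset : Int) (end_offset : Int) (out : Int × Int) : Decidable (Spec_get_idx_from_offset token_offsets start_offset end_offset out) := by unfold Spec_get_idx_from_offset; infer_instance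

-- ===== CLAIM (what is proved, stated in full; the proofs are below) =====
def Claim_equal_get_idx_from_offset : Prop := ∀ (token_offsets : List (Int × Int)) (start_offset : Int) (end_offset : Int), Dom_get_idx_from_offset token_offsets start_offset end_offset → Spec_get_idx_from_offset token_offsets start_offset end_offset (get_idx_from_offset token_offsets start_offset end_offset)

-- ===== LEMMAS AND PROOFS =====

-- forward last-match-wins start scan (the shape A's start accumulator takes)
def pvFs (start_offset : Int) : List (Int × Int) → Nat → Int → Int
  | [], _, s => s
  | (a, b) :: rest, idx, s =>
    pvFs start_offset rest (idx + 1) (if start_offset ≥ a ∧ start_offset ≤ b then (idx : Int) else s)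

lemma pvFindEnd_bounds (eo : Int) : ∀ (l : List (Int × Int)) (idx i : Nat),
    pvFindEnd eo l idx = some i → idx ≤ i ∧ i < idx + l.length := by
  intro l
  induction l with
  | nil => intro idx i h; simp [pvFindEnd] at h
  | cons x rest ih =>
    intro idx i h
    obtain ⟨a, b⟩ := x
    by_cases hc : a ≤ eo ∧ eo ≤ b
    · simp [pvFindEnd, hc] at h; subst h; constructor <;> simp
    · simp [pvFindEnd, hc] at h
      have := ih (idx + 1) i h
      simp; omega

lemma pvGoA_char (so eo : Int) : ∀ (l : List (Int × Int)) (idx : Nat) (s : Int),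
    pvGoA so eo l idx s =
      match pvFindEnd eo l idx with
      | some i => (pvFs so (l.take (i - idx + 1)) idx s, (i : Int) + 1)
      | none => (pvFs so l idx s, -1) := by
  intro l
  induction l with
  | nil => intro idx s; simp [pvGoA, pvFindEnd, pvFs]
  | cons x rest ih =>
    intro idx s
    obtain ⟨a, b⟩ := x
    by_cases he : a ≤ eo ∧ eo ≤ b
    · have he' : eo ≥ a ∧ eo ≤ b := ⟨he.1, he.2⟩
      simp only [pvGoA, pvFindEnd, he, he', if_true, if_pos]
      simp [pvFs]
    · have he' : ¬ (eo ≥ a ∧ eo ≤ b) := he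
      simp only [pvGoA, pvFindEnd, he, he', if_false, if_neg]
      rw [ih (idx + 1)]
      cases h : pvFindEnd eo rest (idx + 1) with
      | none => simp [pvFs]
      | some i =>
        have hb := pvFindEnd_bounds eo rest (idx + 1) i h
        have h1 : i - idx + 1 = (i - (idx + 1) + 1) + 1 := by omega
        simp only [h1, List.take_succ_cons]
        simp [pvFs]

lemma pvFs_snoc (so : Int) : ∀ (l : List (Int × Int)) (idx : Nat) (s : Int) (a b : Int),
    pvFs so (l ++ [(a, b)]) idx s =
      if so ≥ a ∧ so ≤ b then ((idx + l.length : Nat) : Int) else pvFs so l idx s := by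
  intro l
  induction l with
  | nil => intro idx s a b; simp [pvFs]
  | cons y rest ih =>
    intro idx s a b
    obtain ⟨c, d⟩ := y
    simp only [List.cons_append, pvFs]
    rw [ih]
    have : idx + 1 + rest.length = idx + (rest.length + 1) := by omega
    simp [this]

lemma pvFs_eq_rev (so : Int) : ∀ (l : List (Int × Int)) (idx : Nat),
    pvFs so l idx (-1) = pvFindStartRev so l.reverse (idx + l.length - 1) := by
  intro l
  induction l using List.reverseRecOn with
  | nil => intro idx; simp [pvFs, pvFindStartRev]
  | append_singleton l x ih =>
    intro idx
    obtain ⟨a, b⟩ := x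
    rw [pvFs_snoc]
    have hrev : (l ++ [(a, b)]).reverse = (a, b) :: l.reverse := by simp
    have hlen : idx + (l ++ [(a, b)]).length - 1 = idx + l.length := by simp
    rw [hrev, hlen]
    by_cases hc : a ≤ so ∧ so ≤ b
    · have hc' : so ≥ a ∧ so ≤ b := ⟨hc.1, hc.2⟩
      simp [pvFindStartRev, hc, hc']
    · have hc' : ¬ (so ≥ a ∧ so ≤ b) := hc
      simp only [pvFindStartRev, hc, if_neg, if_false]
      rw [ih idx]

-- ===== VERDICT (by name: the statement is the Claim_ definition above) =====
theorem get_idx_from_offset_spec : Claim_equal_get_idx_from_offset := by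
  intro toks so eo _
  unfold Spec_get_idx_from_offset get_idx_from_offset get_idx_from_offset_alt
  by_cases hnil : toks = []
  · subst hnil; simp [pvFindEnd, pvFindStartRev]
  · rw [if_neg hnil, pvGoA_char]
    cases h : pvFindEnd eo toks 0 with
    | none =>
      have := pvFs_eq_rev so toks 0
      simp at this
      simp [this]
    | some i =>
      have hb := pvFindEnd_bounds eo toks 0 i h
      have hlen : (toks.take (i + 1)).length = i + 1 := by
        rw [List.length_take]; omega
      have := pvFs_eq_rev so (toks.take (i + 1)) 0
      rw [hlen] at this
      simp at this
      simp only [Nat.sub_zero]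
      simp [this]
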